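-- pv_equiv track=rewrite | github.com/abusi/advent_of_code2020 | aoc2020/day_11/day_11.py | adjfree
-- ===== SOURCE A (Python) =====
-- def _find_seat(j, i, mat, offset):
--     k = j + offset[0]
--     l = i + offset[1]
--     while True:
--         if k >= len(mat) or k < 0:
--             return (-1, -1)
--         if l >= len(mat[0]) or l < 0:
--             return (-1, -1)
--         if mat[k][l] != ".":
--             return (k, l)
--         k += offset[0]
--         l += offset[1]
--
-- def _get_coord(j, i, mat=None):
--     if not mat:
--         return [
--             (j + 1, i),
--             (j + 1, i + 1),
--             (j, i + 1),
--             (j - 1, i + 1),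
--             (j - 1, i),
--             (j - 1, i - 1),
--             (j, i - 1),
--             (j + 1, i - 1),
--         ]
--
--     offsets = [
--         (+1, 0),
--         (+1, +1),
--         (0, +1),
--         (-1, +1),
--         (-1, 0),
--         (-1, -1),
--         (0, -1),
--         (+1, -1),
--     ]
--     return [_find_seat(j, i, mat, off) for off in offsets]
--
-- def adjfree(j, i, mat, f=False):
--     if not f:
--         t = _get_coord(j, i)
--     else:
--         t = _get_coord(j, i, mat)
--
--     for j, i in t:
--         if j >= len(mat) or j < 0:
--             continue
--         if i >= len(mat[0]) or i < 0:
--             continue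
--         if mat[j][i] == "#":
--             return False
--
--     return True
-- ===== SOURCE B (Python) =====
-- def adjfree(j, i, mat, f=False):
--     rows = len(mat)
--     cols = len(mat[0]) if mat else 0
--     dirs = [(dy, dx) for dy in (-1, 0, 1) for dx in (-1, 0, 1) if dy or dx]
--     d = 1
--     while dirs:
--         alive = []
--         for dy, dx in dirs:
--             y, x = j + dy * d, i + dx * d
--             if 0 <= y < rows and 0 <= x < cols:
--                 c = mat[y][x]
--                 if c == "#":
--                     return False
--                 if c == "." and f:
--                     alive.append((dy, dx))
--         dirs = alive
--         d += 1
--     return True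
-- ===== Notes on version B (the rewrite author's own statement) =====
-- stated objective: alternative
-- what changed: B replaces A's per-direction pipeline (8 independent ray walks via _find_seat, an intermediate coordinate list with a (-1,-1) sentinel, then a second bounds-checking loop) with a single expanding-ring search: one outer loop over the distance d = 1,2,... that probes all still-open directions at that distance simultaneously and keeps a shrinking frontier of directions whose cell at distance d is an in-bounds floor '.', returning False the moment any probed cell is '#' and True when the frontier empties.
-- outside the precondition, e.g. on adjfree(0, 0, [['#', '#'], ['#']], False): A returns False, B returns False
import Mathlib
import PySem

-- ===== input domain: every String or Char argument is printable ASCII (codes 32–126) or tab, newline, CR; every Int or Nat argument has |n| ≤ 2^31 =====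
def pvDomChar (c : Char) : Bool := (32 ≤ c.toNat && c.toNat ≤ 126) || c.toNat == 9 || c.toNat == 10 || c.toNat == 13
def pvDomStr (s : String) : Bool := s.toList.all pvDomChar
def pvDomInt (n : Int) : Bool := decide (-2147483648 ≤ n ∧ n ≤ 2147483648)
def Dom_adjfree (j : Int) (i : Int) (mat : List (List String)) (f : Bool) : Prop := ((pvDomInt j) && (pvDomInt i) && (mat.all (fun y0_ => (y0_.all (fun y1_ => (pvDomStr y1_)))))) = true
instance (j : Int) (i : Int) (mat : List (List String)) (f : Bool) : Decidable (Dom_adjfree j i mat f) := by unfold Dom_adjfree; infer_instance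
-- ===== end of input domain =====

-- B replaces A's eight independent ray casts (helpers building an intermediate coordinate
-- list, then a second checking loop) with one expanding-ring loop over the distance that
-- probes a shrinking frontier of still-open directions: a different decomposition, same cost.
-- Return-value equivalence only; neither program mutates its arguments.

-- mat[k][l] for indices that the surrounding guards keep in range (exact there)
def pvCell (mat : List (List String)) (k l : Int) : String :=
  (PySem.List.pyGet? ((PySem.List.pyGet? mat k).getD []) l).getD ""

-- fuel bound for A's `while` loop (the ray leaves the grid or stops within this many steps)
def pvFuel (mat : List (List String)) : Nat := mat.length + (mat.headD []).length + 2

-- ===== PORT A =====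
def findSeatGo (mat : List (List String)) (dy dx : Int) : Nat → Int → Int → Int × Int
  | 0, _, _ => (-1, -1)
  | fuel+1, k, l =>
    if (mat.length : Int) ≤ k ∨ k < 0 then (-1, -1)
    else if ((mat.headD []).length : Int) ≤ l ∨ l < 0 then (-1, -1)
    else if pvCell mat k l ≠ "." then (k, l)
    else findSeatGo mat dy dx fuel (k + dy) (l + dx)

def findSeat (j i : Int) (mat : List (List String)) (off : Int × Int) : Int × Int :=
  findSeatGo mat off.1 off.2 (pvFuel mat) (j + off.1) (i + off.2)

def pvOffsets : List (Int × Int) :=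
  [(1, 0), (1, 1), (0, 1), (-1, 1), (-1, 0), (-1, -1), (0, -1), (1, -1)]

def getCoord (j i : Int) (omat : Option (List (List String))) : List (Int × Int) :=
  match omat with
  | none => [(j+1, i), (j+1, i+1), (j, i+1), (j-1, i+1), (j-1, i), (j-1, i-1), (j, i-1), (j+1, i-1)]
  | some mat =>
    if mat = [] then
      [(j+1, i), (j+1, i+1), (j, i+1), (j-1, i+1), (j-1, i), (j-1, i-1), (j, i-1), (j+1, i-1)]
    else pvOffsets.map (fun off => findSeat j i mat off)

def loopA (mat : List (List String)) : List (Int × Int) → Bool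
  | [] => true
  | (a, b) :: rest =>
    if (mat.length : Int) ≤ a ∨ a < 0 then loopA mat rest
    else if ((mat.headD []).length : Int) ≤ b ∨ b < 0 then loopA mat rest
    else if pvCell mat a b = "#" then false
    else loopA mat rest

def adjfree (j : Int) (i : Int) (mat : List (List String)) (f : Bool) : Bool :=
  loopA mat (if f = false then getCoord j i none else getCoord j i (some mat))

-- ===== PORT B =====
def pvCols (mat : List (List String)) : Int :=
  match mat with
  | [] => 0
  | r :: _ => (r.length : Int)

-- the direction list B builds by comprehension: all (dy,dx) ≠ (0,0)
def pvDirs : List (Int × Int) :=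
  [(-1, -1), (-1, 0), (-1, 1), (0, -1), (0, 1), (1, -1), (1, 0), (1, 1)]

-- fuel bound for B's `while dirs` loop (the frontier empties within this many distances)
def pvFuelB (j i : Int) (mat : List (List String)) : Nat :=
  mat.length + (mat.headD []).length + j.natAbs + i.natAbs + 2

-- the inner `for dy, dx in dirs` loop: none = early `return False`, some = the new frontier
def ringStep (mat : List (List String)) (f : Bool) (j i d : Int) :
    List (Int × Int) → List (Int × Int) → Option (List (Int × Int))
  | [], alive => some alive
  | (dy, dx) :: rest, alive =>
    if 0 ≤ j + dy * d ∧ j + dy * d < (mat.length : Int) ∧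
       0 ≤ i + dx * d ∧ i + dx * d < pvCols mat then
      if pvCell mat (j + dy * d) (i + dx * d) = "#" then none
      else if pvCell mat (j + dy * d) (i + dx * d) = "." ∧ f = true then
        ringStep mat f j i d rest (alive ++ [(dy, dx)])
      else ringStep mat f j i d rest alive
    else ringStep mat f j i d rest alive

-- the outer `while dirs:` loop, advancing the distance d
def ringGo (mat : List (List String)) (f : Bool) (j i : Int) :
    Nat → Int → List (Int × Int) → Bool
  | 0, _, _ => true
  | fuel+1, d, dirs =>
    if dirs = [] then true
    else
      match ringStep mat f j i d dirs [] with
      | none => false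
      | some alive => ringGo mat f j i fuel (d + 1) alive

def adjfree_alt (j : Int) (i : Int) (mat : List (List String)) (f : Bool) : Bool :=
  ringGo mat f j i (pvFuelB j i mat) 1 pvDirs

-- ===== PRECONDITION & SPEC =====
-- Pre_ excludes ragged matrices (a row shorter than the first row), on which both Pythons may
-- raise IndexError when such a row is probed; on a few of them the probe is never reached and
-- A (and B) still return — see the cite in claim.json.
def Pre_adjfree (j : Int) (i : Int) (mat : List (List String)) (f : Bool) : Prop :=
  ∀ r ∈ mat, (mat.headD []).length ≤ r.length
instance (j : Int) (i : Int) (mat : List (List String)) (f : Bool) : Decidable (Pre_adjfree j i mat f) := by unfold Pre_adjfree; infer_instance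

def pvWitness_adjfree : Int × Int × List (List String) × Bool :=
  (0, 0, [[".", "#"], ["L", "."]], false)

def Spec_adjfree (j : Int) (i : Int) (mat : List (List String)) (f : Bool) (out : Bool) : Prop := out = adjfree_alt j i mat f
instance (j : Int) (i : Int) (mat : List (List String)) (f : Bool) (out : Bool) : Decidable (Spec_adjfree j i mat f out) := by unfold Spec_adjfree; infer_instance

-- ===== CLAIM (what is proved, stated in full; the proofs are below) =====
def Claim_equal_adjfree : Prop := ∀ (j : Int) (i : Int) (mat : List (List String)) (f : Bool), Dom_adjfree j i mat f → Pre_adjfree j i mat f → Spec_adjfree j i mat f (adjfree j i mat f)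

-- ===== LEMMAS AND PROOFS =====

-- "the cell at p is an in-bounds occupied seat" — the atom both loops test
def badB (mat : List (List String)) (p : Int × Int) : Bool :=
  decide (0 ≤ p.1 ∧ p.1 < (mat.length : Int) ∧ 0 ≤ p.2 ∧ p.2 < pvCols mat ∧ pvCell mat p.1 p.2 = "#")

def bstep (mat : List (List String)) (p : Int × Int) (r : Bool) : Bool :=
  if 0 ≤ p.1 ∧ p.1 < (mat.length : Int) ∧ 0 ≤ p.2 ∧ p.2 < pvCols mat ∧ pvCell mat p.1 p.2 = "#" then
    false
  else r

-- one direction of B's ring, followed on its own (proof-side characterisation)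
def rayB (mat : List (List String)) (f : Bool) (j i dy dx : Int) : Nat → Int → Bool
  | 0, _ => true
  | fuel+1, d =>
    if 0 ≤ j + dy * d ∧ j + dy * d < (mat.length : Int) ∧
       0 ≤ i + dx * d ∧ i + dx * d < pvCols mat then
      if pvCell mat (j + dy * d) (i + dx * d) = "#" then false
      else if pvCell mat (j + dy * d) (i + dx * d) = "." ∧ f = true then
        rayB mat f j i dy dx fuel (d + 1)
      else true
    else true

def hashB (mat : List (List String)) (j i d : Int) (dir : Int × Int) : Bool :=
  decide (0 ≤ j + dir.1 * d ∧ j + dir.1 * d < (mat.length : Int) ∧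
          0 ≤ i + dir.2 * d ∧ i + dir.2 * d < pvCols mat ∧
          pvCell mat (j + dir.1 * d) (i + dir.2 * d) = "#")

def aliveBp (mat : List (List String)) (f : Bool) (j i d : Int) (dir : Int × Int) : Bool :=
  decide (0 ≤ j + dir.1 * d ∧ j + dir.1 * d < (mat.length : Int) ∧
          0 ≤ i + dir.2 * d ∧ i + dir.2 * d < pvCols mat ∧
          pvCell mat (j + dir.1 * d) (i + dir.2 * d) = "." ∧ f = true)

lemma pvCols_eq (mat : List (List String)) : pvCols mat = ((mat.headD []).length : Int) := by
  cases mat <;> rfl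

lemma bstep_eq_badB (mat : List (List String)) (p : Int × Int) (r : Bool) :
    bstep mat p r = ((!badB mat p) && r) := by
  by_cases h : 0 ≤ p.1 ∧ p.1 < (mat.length : Int) ∧ 0 ≤ p.2 ∧ p.2 < pvCols mat ∧
      pvCell mat p.1 p.2 = "#"
  · unfold bstep badB
    rw [if_pos h, decide_eq_true h, Bool.not_true, Bool.false_and]
  · unfold bstep badB
    rw [if_neg h, decide_eq_false h, Bool.not_false, Bool.true_and]

lemma loopA_eq (mat : List (List String)) (ts : List (Int × Int)) :
    loopA mat ts = ts.foldr (bstep mat) true := by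
  induction ts with
  | nil => rfl
  | cons p rest ih =>
    obtain ⟨a, b⟩ := p
    simp only [loopA, List.foldr_cons, ih, bstep, pvCols_eq]
    by_cases h1 : (mat.length : Int) ≤ a ∨ a < 0
    · rw [if_pos h1, if_neg]; rintro ⟨c1, c2, -⟩; omega
    · by_cases h2 : ((mat.headD []).length : Int) ≤ b ∨ b < 0
      · rw [if_neg h1, if_pos h2, if_neg]; rintro ⟨-, -, c3, c4, -⟩; omega
      · by_cases h3 : pvCell mat a b = "#"
        · rw [if_neg h1, if_neg h2, if_pos h3, if_pos]
          exact ⟨by omega, by omega, by omega, by omega, h3⟩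
        · rw [if_neg h1, if_neg h2, if_neg h3, if_neg]; rintro ⟨-, -, -, -, c⟩; exact h3 c

lemma foldr_bstep_all (mat : List (List String)) (ts : List (Int × Int)) :
    ts.foldr (bstep mat) true = ts.all (fun p => !badB mat p) := by
  induction ts with
  | nil => rfl
  | cons p rest ih => rw [List.foldr_cons, bstep_eq_badB, ih, List.all_cons]

lemma loopA_nil (ts : List (Int × Int)) : loopA [] ts = true := by
  induction ts with
  | nil => rfl
  | cons p rest ih =>
    obtain ⟨a, b⟩ := p
    simp only [loopA, List.length_nil, Nat.cast_zero]
    split_ifs <;> first | exact ih | omega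

lemma ringStep_eq (mat : List (List String)) (f : Bool) (j i d : Int) :
    ∀ (dirs alive : List (Int × Int)),
      ringStep mat f j i d dirs alive =
        if dirs.any (hashB mat j i d) then none
        else some (alive ++ dirs.filter (aliveBp mat f j i d)) := by
  intro dirs
  induction dirs with
  | nil => intro alive; simp [ringStep]
  | cons dir rest ih =>
    intro alive
    obtain ⟨dy, dx⟩ := dir
    simp only [ringStep, List.any_cons, List.filter_cons]
    by_cases hin : 0 ≤ j + dy * d ∧ j + dy * d < (mat.length : Int) ∧
        0 ≤ i + dx * d ∧ i + dx * d < pvCols mat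
    · rw [if_pos hin]
      by_cases hh : pvCell mat (j + dy * d) (i + dx * d) = "#"
      · have : hashB mat j i d (dy, dx) = true := by
          unfold hashB; exact decide_eq_true ⟨hin.1, hin.2.1, hin.2.2.1, hin.2.2.2, hh⟩
        simp [hh, this]
      · have hhb : hashB mat j i d (dy, dx) = false := by
          unfold hashB
          exact decide_eq_false (fun h => hh h.2.2.2.2)
        by_cases ha : pvCell mat (j + dy * d) (i + dx * d) = "." ∧ f = true
        · have hab : aliveBp mat f j i d (dy, dx) = true := by
            unfold aliveBp
            exact decide_eq_true ⟨hin.1, hin.2.1, hin.2.2.1, hin.2.2.2, ha.1, ha.2⟩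
          rw [if_neg hh, if_pos ha, ih, hhb, hab]
          rw [Bool.false_or]
          simp
        · have hab : aliveBp mat f j i d (dy, dx) = false := by
            unfold aliveBp
            exact decide_eq_false (fun h => ha ⟨h.2.2.2.2.1, h.2.2.2.2.2⟩)
          rw [if_neg hh, if_neg ha, ih, hhb, hab]
          rw [Bool.false_or]
          simp
    · have hhb : hashB mat j i d (dy, dx) = false := by
        unfold hashB
        exact decide_eq_false (fun h => hin ⟨h.1, h.2.1, h.2.2.1, h.2.2.2.1⟩)
      have hab : aliveBp mat f j i d (dy, dx) = false := by
        unfold aliveBp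
        exact decide_eq_false (fun h => hin ⟨h.1, h.2.1, h.2.2.1, h.2.2.2.1⟩)
      rw [if_neg hin, ih, hhb, hab]
      rw [Bool.false_or]
      simp

lemma all_congr_mem {α : Type} (l : List α) (p q : α → Bool)
    (h : ∀ a ∈ l, p a = q a) : l.all p = l.all q := by
  induction l with
  | nil => rfl
  | cons a rest ih =>
    simp only [List.all_cons]
    rw [h a (by simp), ih (fun x hx => h x (by simp [hx]))]

lemma all_filter_or {α : Type} (l : List α) (p q : α → Bool) :
    (l.filter p).all q = l.all (fun a => !p a || q a) := by
  induction l with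
  | nil => rfl
  | cons a rest ih =>
    simp only [List.filter_cons]
    by_cases hp : p a = true
    · simp [hp, ih]
    · simp only [Bool.not_eq_true] at hp
      simp [hp, ih]

lemma ring_all (mat : List (List String)) (f : Bool) (j i : Int) :
    ∀ (fuel : Nat) (d : Int) (dirs : List (Int × Int)),
      ringGo mat f j i fuel d dirs =
        dirs.all (fun dir => rayB mat f j i dir.1 dir.2 fuel d) := by
  intro fuel
  induction fuel with
  | zero =>
    intro d dirs
    simp [ringGo, rayB, List.all_eq_true]
  | succ n ih =>
    intro d dirs
    by_cases hnil : dirs = []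
    · subst hnil; simp [ringGo]
    · simp only [ringGo, if_neg hnil, ringStep_eq]
      by_cases hany : dirs.any (hashB mat j i d) = true
      · rw [if_pos hany]
        obtain ⟨dir, hmem, hdir⟩ := List.any_eq_true.mp hany
        show (false : Bool) = _
        symm
        apply List.all_eq_false.mpr
        obtain ⟨dy, dx⟩ := dir
        unfold hashB at hdir
        have h := of_decide_eq_true hdir
        have hin : 0 ≤ j + dy * d ∧ j + dy * d < (mat.length : Int) ∧
            0 ≤ i + dx * d ∧ i + dx * d < pvCols mat :=
          ⟨h.1, h.2.1, h.2.2.1, h.2.2.2.1⟩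
        have hsh : pvCell mat (j + dy * d) (i + dx * d) = "#" := h.2.2.2.2
        refine ⟨(dy, dx), hmem, ?_⟩
        simp only [rayB, if_pos hin, if_pos hsh]
        simp
      · rw [if_neg hany]
        show ringGo mat f j i n (d + 1) ([] ++ List.filter (aliveBp mat f j i d) dirs) = _
        rw [List.nil_append, ih, all_filter_or]
        apply all_congr_mem
        intro dir hmem
        obtain ⟨dy, dx⟩ := dir
        have hnh : hashB mat j i d (dy, dx) = false := by
          rcases Bool.eq_false_or_eq_true (dirs.any (hashB mat j i d)) with h | h
          · exact absurd h hany
          · exact Bool.eq_false_iff.mpr ((List.any_eq_false.mp h) _ hmem)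
        unfold hashB at hnh
        have hnh' := of_decide_eq_false hnh
        unfold aliveBp
        simp only [rayB]
        by_cases hin : 0 ≤ j + dy * d ∧ j + dy * d < (mat.length : Int) ∧
            0 ≤ i + dx * d ∧ i + dx * d < pvCols mat
        · have hh : pvCell mat (j + dy * d) (i + dx * d) ≠ "#" := fun hc =>
            hnh' ⟨hin.1, hin.2.1, hin.2.2.1, hin.2.2.2, hc⟩
          rw [if_pos hin, if_neg hh]
          by_cases ha : pvCell mat (j + dy * d) (i + dx * d) = "." ∧ f = true
          · rw [if_pos ha,
              decide_eq_true (p := _ ∧ _) ⟨hin.1, hin.2.1, hin.2.2.1, hin.2.2.2, ha.1, ha.2⟩]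
            simp
          · rw [if_neg ha,
              decide_eq_false (fun h => ha ⟨h.2.2.2.2.1, h.2.2.2.2.2⟩)]
            simp
        · rw [if_neg hin,
            decide_eq_false (fun h => hin ⟨h.1, h.2.1, h.2.2.1, h.2.2.2.1⟩)]
          simp


-- a walk from an out-of-bounds cell immediately reports the (-1,-1) sentinel
lemma findSeatGo_oob (mat : List (List String)) (dy dx : Int) (fuel : Nat) (y x : Int)
    (h : (mat.length : Int) ≤ y ∨ y < 0 ∨ ((mat.headD []).length : Int) ≤ x ∨ x < 0) :
    findSeatGo mat dy dx fuel y x = (-1, -1) := by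
  cases fuel with
  | zero => rfl
  | succ n =>
    simp only [findSeatGo]
    by_cases h1 : (mat.length : Int) ≤ y ∨ y < 0
    · rw [if_pos h1]
    · rw [if_neg h1, if_pos (by omega)]

lemma bstep_sentinel (mat : List (List String)) (r : Bool) :
    bstep mat (-1, -1) r = r := by
  unfold bstep
  rw [if_neg]
  rintro ⟨h, -⟩
  omega

-- one direction of B's ring equals the bstep-view of A's ray walk, given enough fuel
lemma ray_find (mat : List (List String)) (j i dy dx : Int)
    (hdy : dy = -1 ∨ dy = 0 ∨ dy = 1) (hdx : dx = -1 ∨ dx = 0 ∨ dx = 1)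
    (hnz : ¬(dy = 0 ∧ dx = 0)) :
    ∀ (fuel fuel' : Nat) (d : Int),
      (dy = 1 → (mat.length : Int) ≤ (fuel : Int) + (j + dy * d) ∨ j + dy * d < 0) →
      (dy = -1 → j + dy * d < (fuel : Int) ∨ (mat.length : Int) ≤ j + dy * d) →
      (dx = 1 → pvCols mat ≤ (fuel : Int) + (i + dx * d) ∨ i + dx * d < 0) →
      (dx = -1 → i + dx * d < (fuel : Int) ∨ pvCols mat ≤ i + dx * d) →
      (dy = 1 → (mat.length : Int) ≤ (fuel' : Int) + (j + dy * d) ∨ j + dy * d < 0) →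
      (dy = -1 → j + dy * d < (fuel' : Int) ∨ (mat.length : Int) ≤ j + dy * d) →
      (dx = 1 → pvCols mat ≤ (fuel' : Int) + (i + dx * d) ∨ i + dx * d < 0) →
      (dx = -1 → i + dx * d < (fuel' : Int) ∨ pvCols mat ≤ i + dx * d) →
      rayB mat true j i dy dx fuel d =
        bstep mat (findSeatGo mat dy dx fuel' (j + dy * d) (i + dx * d)) true := by
  intro fuel
  induction fuel with
  | zero =>
    intro fuel' d h1 h2 h3 h4 _ _ _ _
    have hoob : (mat.length : Int) ≤ j + dy * d ∨ j + dy * d < 0 ∨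
        ((mat.headD []).length : Int) ≤ i + dx * d ∨ i + dx * d < 0 := by
      rw [pvCols_eq] at h3 h4
      by_cases h : dy = 0
      · have hx : dx = -1 ∨ dx = 1 := by
          rcases hdx with h' | h' | h'
          exacts [Or.inl h', absurd ⟨h, h'⟩ hnz, Or.inr h']
        rcases hx with h' | h'
        · have := h4 h'; subst h'; push_cast at this; omega
        · have := h3 h'; subst h'; push_cast at this; omega
      · have hy : dy = -1 ∨ dy = 1 := by
          rcases hdy with h' | h' | h'
          exacts [Or.inl h', absurd h' h, Or.inr h']
        rcases hy with h' | h'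
        · have := h2 h'; subst h'; push_cast at this; omega
        · have := h1 h'; subst h'; push_cast at this; omega
    rw [findSeatGo_oob mat dy dx fuel' _ _ hoob, bstep_sentinel]
    rfl
  | succ n ih =>
    intro fuel' d h1 h2 h3 h4 h1' h2' h3' h4'
    by_cases hin : 0 ≤ j + dy * d ∧ j + dy * d < (mat.length : Int) ∧
        0 ≤ i + dx * d ∧ i + dx * d < pvCols mat
    · rw [pvCols_eq] at hin
      cases fuel' with
      | zero =>
        exfalso
        rw [pvCols_eq] at h3' h4'
        by_cases h : dy = 0
        · have hx : dx = -1 ∨ dx = 1 := by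
            rcases hdx with h' | h' | h'
            exacts [Or.inl h', absurd ⟨h, h'⟩ hnz, Or.inr h']
          rcases hx with h' | h'
          · have := h4' h'; subst h'; push_cast at this; omega
          · have := h3' h'; subst h'; push_cast at this; omega
        · have hy : dy = -1 ∨ dy = 1 := by
            rcases hdy with h' | h' | h'
            exacts [Or.inl h', absurd h' h, Or.inr h']
          rcases hy with h' | h'
          · have := h2' h'; subst h'; push_cast at this; omega
          · have := h1' h'; subst h'; push_cast at this; omega
      | succ g =>
        have hin' : 0 ≤ j + dy * d ∧ j + dy * d < (mat.length : Int) ∧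
            0 ≤ i + dx * d ∧ i + dx * d < pvCols mat := by
          rw [pvCols_eq]; exact hin
        simp only [rayB, findSeatGo, if_pos hin',
          if_neg (show ¬((mat.length : Int) ≤ j + dy * d ∨ j + dy * d < 0) by omega),
          if_neg (show ¬(((mat.headD []).length : Int) ≤ i + dx * d ∨ i + dx * d < 0) by omega)]
        by_cases hh : pvCell mat (j + dy * d) (i + dx * d) = "#"
        · rw [if_pos hh, if_pos (by rw [hh]; decide)]
          unfold bstep
          rw [if_pos ⟨by omega, by omega, by omega, by rw [pvCols_eq]; omega, hh⟩]
        · rw [if_neg hh]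
          by_cases hc : pvCell mat (j + dy * d) (i + dx * d) = "."
          · have hdot : pvCell mat (j + dy * d) (i + dx * d) = "." ∧ True := ⟨hc, trivial⟩
            rw [if_pos hdot, if_neg (not_not_intro hc)]
            have ey : j + dy * d + dy = j + dy * (d + 1) := by ring
            have ex : i + dx * d + dx = i + dx * (d + 1) := by ring
            rw [ey, ex]
            refine ih g (d + 1) ?_ ?_ ?_ ?_ ?_ ?_ ?_ ?_
            · intro h; have := h1 h; subst h; push_cast at this ⊢; omega
            · intro h; have := h2 h; subst h; push_cast at this ⊢; omega
            · intro h; have := h3 h; rw [pvCols_eq] at this ⊢; subst h; push_cast at this ⊢; omega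
            · intro h; have := h4 h; rw [pvCols_eq] at this ⊢; subst h; push_cast at this ⊢; omega
            · intro h; have := h1' h; subst h; push_cast at this ⊢; omega
            · intro h; have := h2' h; subst h; push_cast at this ⊢; omega
            · intro h; have := h3' h; rw [pvCols_eq] at this ⊢; subst h; push_cast at this ⊢; omega
            · intro h; have := h4' h; rw [pvCols_eq] at this ⊢; subst h; push_cast at this ⊢; omega
          · rw [if_neg (fun hand => hc hand.1), if_pos hc]
            unfold bstep
            rw [if_neg]
            rintro ⟨-, -, -, -, c⟩
            exact hh c
    · have hin' : ¬(0 ≤ j + dy * d ∧ j + dy * d < (mat.length : Int) ∧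
          0 ≤ i + dx * d ∧ i + dx * d < ((mat.headD []).length : Int)) := by
        rw [← pvCols_eq]; exact hin
      have hoob : (mat.length : Int) ≤ j + dy * d ∨ j + dy * d < 0 ∨
          ((mat.headD []).length : Int) ≤ i + dx * d ∨ i + dx * d < 0 := by omega
      rw [findSeatGo_oob mat dy dx _ _ _ hoob, bstep_sentinel]
      simp only [rayB, if_neg hin]

-- a B-direction's ray, with B's fuel, equals the bstep-view of A's findSeat for that direction
lemma ray_bstep (mat : List (List String)) (j i dy dx : Int)
    (hd : (dy, dx) ∈ pvDirs) :
    rayB mat true j i dy dx (pvFuelB j i mat) 1 =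
      bstep mat (findSeat j i mat (dy, dx)) true := by
  have hprop : (dy = -1 ∨ dy = 0 ∨ dy = 1) ∧ (dx = -1 ∨ dx = 0 ∨ dx = 1) ∧ ¬(dy = 0 ∧ dx = 0) := by
    simp only [pvDirs, List.mem_cons, List.not_mem_nil, or_false, Prod.mk.injEq] at hd
    rcases hd with ⟨h, h'⟩ | ⟨h, h'⟩ | ⟨h, h'⟩ | ⟨h, h'⟩ | ⟨h, h'⟩ | ⟨h, h'⟩ | ⟨h, h'⟩ | ⟨h, h'⟩ <;>
      subst h <;> subst h' <;> norm_num
  have key := ray_find mat j i dy dx hprop.1 hprop.2.1 hprop.2.2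
    (pvFuelB j i mat) (pvFuel mat) 1
  unfold findSeat
  have e1 : j + dy * 1 = j + dy := by ring
  have e2 : i + dx * 1 = i + dx := by ring
  rw [e1, e2] at key
  have hfB : ((pvFuelB j i mat : Nat) : Int) =
      (mat.length : Int) + ((mat.headD []).length : Int) + (j.natAbs : Int) + (i.natAbs : Int) + 2 := by
    unfold pvFuelB; push_cast; ring
  have hfA : ((pvFuel mat : Nat) : Int) =
      (mat.length : Int) + ((mat.headD []).length : Int) + 2 := by
    unfold pvFuel; push_cast; ring
  refine key ?_ ?_ ?_ ?_ ?_ ?_ ?_ ?_ <;> intro h <;> subst h <;>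
    simp only [pvCols_eq, hfB, hfA] <;> omega

-- one pass of B's ray at positive fuel, when f is false: just the neighbour check
lemma rayB_false (mat : List (List String)) (j i dy dx : Int) (n : Nat) (d : Int) :
    rayB mat false j i dy dx (n + 1) d = !badB mat (j + dy * d, i + dx * d) := by
  simp only [rayB, badB]
  by_cases hin : 0 ≤ j + dy * d ∧ j + dy * d < (mat.length : Int) ∧
      0 ≤ i + dx * d ∧ i + dx * d < pvCols mat
  · rw [if_pos hin]
    by_cases hh : pvCell mat (j + dy * d) (i + dx * d) = "#"
    · rw [if_pos hh,
        decide_eq_true (p := _ ∧ _) ⟨hin.1, hin.2.1, hin.2.2.1, hin.2.2.2, hh⟩]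
      rfl
    · rw [if_neg hh, if_neg (by simp),
        decide_eq_false (fun hp => hh hp.2.2.2.2)]
      rfl
  · rw [if_neg hin,
      decide_eq_false (fun hp => hin ⟨hp.1, hp.2.1, hp.2.2.1, hp.2.2.2.1⟩)]
    rfl

-- with an empty grid every ray is trivially clear
lemma rayB_nil (f : Bool) (j i dy dx : Int) :
    ∀ (fuel : Nat) (d : Int), rayB [] f j i dy dx fuel d = true := by
  intro fuel d
  cases fuel with
  | zero => rfl
  | succ n =>
    simp only [rayB]
    rw [if_neg]
    rintro ⟨h1, h2, -⟩
    simp only [List.length_nil, Nat.cast_zero] at h2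
    omega

-- ===== VERDICT (by name: the statement is the Claim_ definition above) =====
theorem adjfree_spec : Claim_equal_adjfree := by
  intro j i mat f _hdom _hpre
  unfold Spec_adjfree adjfree adjfree_alt
  rw [ring_all]
  cases f with
  | false =>
    rw [if_pos rfl]
    obtain ⟨n, hn⟩ : ∃ n, pvFuelB j i mat = n + 1 :=
      ⟨pvFuelB j i mat - 1, by unfold pvFuelB; omega⟩
    rw [hn]
    simp only [getCoord, loopA_eq, foldr_bstep_all, pvDirs,
      List.all_cons, List.all_nil, rayB_false, Bool.and_true]
    norm_num
    rw [Bool.eq_iff_iff]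
    simp only [Bool.and_eq_true, Bool.not_eq_true']
    constructor <;> rintro ⟨a1, a2, a3, a4, a5, a6, a7, a8⟩ <;>
      exact ⟨by assumption, by assumption, by assumption, by assumption,
        by assumption, by assumption, by assumption, by assumption⟩
  | true =>
    rw [if_neg (by simp)]
    by_cases hm : mat = []
    · subst hm
      simp only [getCoord, loopA_nil, pvDirs,
        List.all_cons, List.all_nil, rayB_nil, Bool.and_true]
    · simp only [getCoord, if_neg hm, loopA_eq, foldr_bstep_all, List.all_map]
      have hB : pvDirs.all (fun dir => rayB mat true j i dir.1 dir.2 (pvFuelB j i mat) 1)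
          = pvDirs.all (fun dir => bstep mat (findSeat j i mat dir) true) := by
        apply all_congr_mem
        intro dir hmem
        obtain ⟨dy, dx⟩ := dir
        exact ray_bstep mat j i dy dx hmem
      rw [hB]
      have hA : pvOffsets.all ((fun p => !badB mat p) ∘ fun off => findSeat j i mat off)
          = pvOffsets.all (fun dir => bstep mat (findSeat j i mat dir) true) := by
        apply all_congr_mem
        intro dir _
        simp only [Function.comp_apply]
        rw [bstep_eq_badB, Bool.and_true]
      rw [hA]
      simp only [pvOffsets, pvDirs, List.all_cons, List.all_nil, Bool.and_true]
      rw [Bool.eq_iff_iff]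
      simp only [Bool.and_eq_true]
      constructor <;> rintro ⟨a1, a2, a3, a4, a5, a6, a7, a8⟩ <;>
        exact ⟨by assumption, by assumption, by assumption, by assumption,
          by assumption, by assumption, by assumption, by assumption⟩
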